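-- pv_equiv track=rewrite | github.com/das-group/keystone-rba-plugin | keystone_rba_plugin/tests/common/auth.py | history
-- ===== SOURCE A (Python) =====
-- def history(entries):
--     history = {}
--     for entry in entries:
--         for feature, value in entry.items():
--             item = history.setdefault(feature, {})
--             item.setdefault(value, 0)
--             history[feature][value] += 1
--     return history
-- ===== SOURCE B (Python) =====
-- def history(entries):
--     # Pass 1: flatten all entries into (feature, value) pairs and count them
--     # in a single flat table keyed by tuples.
--     flat = {}
--     for entry in entries:
--         for feature, value in entry.items():
--             flat[(feature, value)] = flat.get((feature, value), 0) + 1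
--     # Pass 2: reshape the flat table into the nested dict.
--     result = {}
--     for (feature, value), count in flat.items():
--         result.setdefault(feature, {})[value] = count
--     return result
-- ===== Notes on version B (the rewrite author's own statement) =====
-- stated objective: alternative
-- what changed: A accumulates the nested dict incrementally with per-pair setdefault/increment; B first counts all flattened (feature, value) pairs in one flat tuple-keyed table, then reshapes that table into the nested dict in a second pass.
import Mathlib
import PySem

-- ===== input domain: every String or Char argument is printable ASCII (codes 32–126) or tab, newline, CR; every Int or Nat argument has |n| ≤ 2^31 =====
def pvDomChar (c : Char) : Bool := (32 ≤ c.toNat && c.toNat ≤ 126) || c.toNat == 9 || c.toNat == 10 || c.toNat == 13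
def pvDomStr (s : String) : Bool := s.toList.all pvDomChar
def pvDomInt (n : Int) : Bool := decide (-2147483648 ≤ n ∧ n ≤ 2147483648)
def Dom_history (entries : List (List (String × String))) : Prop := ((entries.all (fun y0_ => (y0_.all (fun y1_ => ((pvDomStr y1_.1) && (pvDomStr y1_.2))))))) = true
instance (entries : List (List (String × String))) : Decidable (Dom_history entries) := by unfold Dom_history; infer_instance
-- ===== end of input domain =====

-- B replaces A's incremental nested accumulation by a flat tuple-keyed count table built in one
-- pass over the flattened pairs, reshaped into the nested dict in a second pass (alternative decomposition).

-- ===== PORT A =====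
-- one iteration of A's inner loop body (feature = p.1, value = p.2)
def aStep (h : PySem.Dict String (PySem.Dict String Int)) (p : String × String) :
    PySem.Dict String (PySem.Dict String Int) :=
  let h1 := h.setdefault p.1 PySem.Dict.empty                   -- item = history.setdefault(feature, {})
  let item := (h1.getD p.1 PySem.Dict.empty).setdefault p.2 0   -- item.setdefault(value, 0) mutates the shared inner dict
  let h2 := h1.insert p.1 item                                  -- … which is visible through history[feature]
  h2.insert p.1 (item.insert p.2 (item.getD p.2 0 + 1))         -- history[feature][value] += 1

def history (entries : List (List (String × String))) : List (String × List (String × Int)) :=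
  let h := entries.foldl (fun h entry => entry.foldl aStep h) PySem.Dict.empty
  h.items.map (fun q => (q.1, q.2.items))

-- ===== PORT B =====
-- pass 1: flat count table keyed by the (feature, value) tuple
def bFlat (entries : List (List (String × String))) : PySem.Dict (String × String) Int :=
  entries.foldl
    (fun flat entry => entry.foldl (fun flat p => flat.insert p (flat.getD p 0 + 1)) flat)
    PySem.Dict.empty

-- pass 2: one reshape step (q = ((feature, value), count))
def bStep (r : PySem.Dict String (PySem.Dict String Int)) (q : (String × String) × Int) :
    PySem.Dict String (PySem.Dict String Int) :=
  let r1 := r.setdefault q.1.1 PySem.Dict.empty                           -- result.setdefault(feature, {})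
  r1.insert q.1.1 ((r1.getD q.1.1 PySem.Dict.empty).insert q.1.2 q.2)     -- …[value] = count

def history_alt (entries : List (List (String × String))) : List (String × List (String × Int)) :=
  let r := (bFlat entries).items.foldl bStep PySem.Dict.empty
  r.items.map (fun q => (q.1, q.2.items))

-- ===== PRECONDITION & SPEC =====
def Spec_history (entries : List (List (String × String))) (out : List (String × List (String × Int))) : Prop := out = history_alt entries
instance (entries : List (List (String × String))) (out : List (String × List (String × Int))) : Decidable (Spec_history entries out) := by unfold Spec_history; infer_instance

-- ===== CLAIM (what is proved, stated in full; the proofs are below) =====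
def Claim_equal_history : Prop := ∀ (entries : List (List (String × String))), Dom_history entries → Spec_history entries (history entries)

-- ===== LEMMAS AND PROOFS =====

-- A's loop body in normal form: one keyed insert
theorem aStep_eq (h : PySem.Dict String (PySem.Dict String Int)) (p : String × String) :
    aStep h p = h.insert p.1 ((h.getD p.1 PySem.Dict.empty).insert p.2
      ((h.getD p.1 PySem.Dict.empty).getD p.2 0 + 1)) := by
  unfold aStep
  dsimp only
  by_cases hc : h.contains p.1 = true
  · rw [PySem.Dict.setdefault_of_contains _ _ hc]
    by_cases hv : (h.getD p.1 PySem.Dict.empty).contains p.2 = true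
    · rw [PySem.Dict.setdefault_of_contains _ _ hv, PySem.Dict.insert_insert_self]
    · have hv' : (h.getD p.1 PySem.Dict.empty).contains p.2 = false := by simpa using hv
      rw [PySem.Dict.setdefault_of_not_contains _ _ hv', PySem.Dict.getD_insert_self,
          PySem.Dict.insert_insert_self, PySem.Dict.insert_insert_self,
          PySem.Dict.getD_of_not_contains _ _ hv']
  · have hc' : h.contains p.1 = false := by simpa using hc
    rw [PySem.Dict.setdefault_of_not_contains _ _ hc', PySem.Dict.getD_insert_self,
        PySem.Dict.setdefault_of_not_contains _ _ (by simp), PySem.Dict.getD_insert_self,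
        PySem.Dict.insert_insert_self, PySem.Dict.insert_insert_self, PySem.Dict.insert_insert_self,
        PySem.Dict.getD_of_not_contains _ _ hc', PySem.Dict.getD_empty]

-- B's reshape step in normal form: one keyed insert
theorem bStep_eq (r : PySem.Dict String (PySem.Dict String Int)) (q : (String × String) × Int) :
    bStep r q = r.insert q.1.1 ((r.getD q.1.1 PySem.Dict.empty).insert q.1.2 q.2) := by
  unfold bStep
  dsimp only
  by_cases hc : r.contains q.1.1 = true
  · rw [PySem.Dict.setdefault_of_contains _ _ hc]
  · have hc' : r.contains q.1.1 = false := by simpa using hc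
    rw [PySem.Dict.setdefault_of_not_contains _ _ hc', PySem.Dict.getD_insert_self,
        PySem.Dict.insert_insert_self, PySem.Dict.getD_of_not_contains _ _ hc']

-- a nested fold over a list of lists is the fold over the flattened list
theorem foldl_foldl_eq_flatMap {α σ : Type} (step : σ → α → σ) (l : List (List α)) (init : σ) :
    l.foldl (fun s e => e.foldl step s) init = (l.flatMap id).foldl step init := by
  induction l generalizing init with
  | nil => simp
  | cons e l ih => simp [List.foldl_append, ih]

-- the inner dict at key f of a keyed-insert fold is the fold of the f-entries
theorem getD_foldl_ikey {β : Type} (key : β → String) (g : PySem.Dict String Int → β → PySem.Dict String Int)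
    (l : List β) (f : String) :
    ∀ d : PySem.Dict String (PySem.Dict String Int),
    (l.foldl (fun h b => h.insert (key b) (g (h.getD (key b) PySem.Dict.empty) b)) d).getD f PySem.Dict.empty
      = (l.filter (fun b => key b == f)).foldl g (d.getD f PySem.Dict.empty) := by
  induction l with
  | nil => intro d; simp
  | cons b l ih =>
    intro d
    simp only [List.foldl_cons, List.filter_cons]
    rw [ih]
    by_cases hk : key b = f
    · subst hk
      simp [PySem.Dict.getD_insert_self]
    · simp [hk, PySem.Dict.getD_insert, Ne.symm hk]

-- dedup-then-map deduplicates to the same set as map-then-dedup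
theorem ofList_map_ofList {α β : Type} [BEq α] [LawfulBEq α] [BEq β] [LawfulBEq β]
    (g : α → β) (xs : List α) :
    PySem.Set.ofList ((PySem.Set.ofList xs).map g) = PySem.Set.ofList (xs.map g) := by
  induction xs using List.reverseRecOn with
  | nil => rfl
  | append_singleton xs x ih =>
    rw [PySem.Set.ofList_append_singleton, List.map_append, List.map_singleton,
        PySem.Set.ofList_append_singleton, ← ih]
    by_cases hm : x ∈ PySem.Set.ofList xs
    · rw [PySem.Set.add_of_mem hm, PySem.Set.add_of_mem]
      rw [PySem.Set.mem_ofList]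
      exact List.mem_map_of_mem hm
    · rw [PySem.Set.add_of_not_mem hm, List.map_append, List.map_singleton,
          PySem.Set.ofList_append_singleton]

-- mapping an injective-on-the-filtered-part function commutes with dedup and filter
theorem map_filter_ofList {α β : Type} [BEq α] [LawfulBEq α] [BEq β] [LawfulBEq β]
    (p : α → Bool) (g : α → β) (xs : List α)
    (hinj : ∀ a ∈ xs, ∀ b ∈ xs, p a = true → p b = true → g a = g b → a = b) :
    ((PySem.Set.ofList xs).filter p).map g = PySem.Set.ofList ((xs.filter p).map g) := by
  induction xs using List.reverseRecOn with
  | nil => rfl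
  | append_singleton xs x ih =>
    have hinj' : ∀ a ∈ xs, ∀ b ∈ xs, p a = true → p b = true → g a = g b → a = b := by
      intro a ha b hb; exact hinj a (List.mem_append_left _ ha) b (List.mem_append_left _ hb)
    rw [PySem.Set.ofList_append_singleton, List.filter_append, List.map_append]
    by_cases hm : x ∈ PySem.Set.ofList xs
    · have hmx : x ∈ xs := (PySem.Set.mem_ofList _ _).1 hm
      rw [PySem.Set.add_of_mem hm, ih hinj']
      by_cases hp : p x = true
      · have : (xs.filter p).map g ++ ([x].filter p).map g = (xs.filter p).map g ++ [g x] := by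
          simp [hp]
        rw [this, PySem.Set.ofList_append_singleton, PySem.Set.add_of_mem]
        rw [PySem.Set.mem_ofList]
        exact List.mem_map_of_mem (List.mem_filter.2 ⟨hmx, hp⟩)
      · simp [hp]
    · have hmx : x ∉ xs := fun h => hm ((PySem.Set.mem_ofList _ _).2 h)
      rw [PySem.Set.add_of_not_mem hm, List.filter_append, List.map_append, ih hinj']
      by_cases hp : p x = true
      · have h1 : ([x].filter p).map g = [g x] := by simp [hp]
        rw [h1, PySem.Set.ofList_append_singleton, PySem.Set.add_of_not_mem]
        rw [PySem.Set.mem_ofList]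
        intro hgx
        rcases List.mem_map.1 hgx with ⟨a, hafil, hag⟩
        have ha : a ∈ xs := (List.mem_filter.1 hafil).1
        have hpa : p a = true := (List.mem_filter.1 hafil).2
        have : a = x := hinj a (List.mem_append_left _ ha) x (by simp) hpa hp hag
        exact hmx (this ▸ ha)
      · simp [hp]

-- counting (f, v) pairs equals counting v among the values of feature f
theorem count_snd_filter (ps : List (String × String)) (f v : String) :
    ((ps.filter (fun p => p.1 == f)).map Prod.snd).count v = ps.count (f, v) := by
  induction ps with
  | nil => rfl
  | cons p ps ih =>
    by_cases h1 : p.1 = f <;> by_cases h2 : p.2 = v <;>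
      simp [List.count_cons, h1, h2, ih, Prod.ext_iff]

-- the inner f-dict built by B's reshape equals the counter of f's values
theorem inner_eq (ps : List (String × String)) (f : String) :
    (((PySem.Set.ofList ps).filter (fun k => k.1 == f)).foldl
        (fun m k => m.insert k.2 ((ps.count k : Int))) PySem.Dict.empty)
      = PySem.Dict.counter ((ps.filter (fun p => p.1 == f)).map Prod.snd) := by
  have hinj : ∀ a ∈ ps, ∀ b ∈ ps, (a.1 == f) = true → (b.1 == f) = true → a.2 = b.2 → a = b := by
    intro a _ b _ ha hb hab
    have ha' : a.1 = f := by simpa using ha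
    have hb' : b.1 = f := by simpa using hb
    exact Prod.ext_iff.2 ⟨ha'.trans hb'.symm, hab⟩
  have hmap : ((PySem.Set.ofList ps).filter (fun k => k.1 == f)).map Prod.snd
      = PySem.Set.ofList ((ps.filter (fun p => p.1 == f)).map Prod.snd) :=
    map_filter_ofList _ _ _ hinj
  apply PySem.Dict.ext
  rw [PySem.Dict.items_counter,
      PySem.Dict.items_foldl_insert_fresh _ (fun k => k.2) (fun k => ((ps.count k : Int)))
        PySem.Dict.empty (fun a _ => PySem.Dict.contains_empty _)
        (by rw [hmap]; exact PySem.Set.nodup_ofList _)]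
  rw [← hmap, List.map_map]
  have hemp : (PySem.Dict.empty : PySem.Dict String Int).items = [] := rfl
  rw [hemp, List.nil_append]
  apply List.map_congr_left
  intro k hk
  have hk1 : k.1 = f := by
    have := (List.mem_filter.1 hk).2
    simpa using this
  simp only [Function.comp_apply]
  rw [count_snd_filter ps f k.2, show ((f, k.2) : String × String) = k from by rw [← hk1]]

-- the two nested dicts are equal
theorem dict_eq (entries : List (List (String × String))) :
    entries.foldl (fun h entry => entry.foldl aStep h) PySem.Dict.empty
      = (bFlat entries).items.foldl bStep PySem.Dict.empty := by
  have hAstep : aStep = fun (h : PySem.Dict String (PySem.Dict String Int)) p =>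
      h.insert p.1 ((h.getD p.1 PySem.Dict.empty).insert p.2
        ((h.getD p.1 PySem.Dict.empty).getD p.2 0 + 1)) :=
    funext fun h => funext fun p => aStep_eq h p
  have hBstep : bStep = fun r q => r.insert q.1.1 ((r.getD q.1.1 PySem.Dict.empty).insert q.1.2 q.2) :=
    funext fun r => funext fun q => bStep_eq r q
  have hflat : bFlat entries = PySem.Dict.counter (entries.flatMap id) := by
    unfold bFlat
    rw [foldl_foldl_eq_flatMap]
    exact PySem.Dict.foldl_insert_getD_add_one_eq_counter _
  set ps := entries.flatMap id with hps
  rw [hAstep, hBstep, hflat, foldl_foldl_eq_flatMap, ← hps, PySem.Dict.items_counter]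
  -- keys of both sides
  have hkA := PySem.Dict.keys_foldl_insert_key ps Prod.fst
      (fun (h : PySem.Dict String (PySem.Dict String Int)) p =>
        ((h.getD p.1 PySem.Dict.empty).insert p.2
          ((h.getD p.1 PySem.Dict.empty).getD p.2 0 + 1))) PySem.Dict.empty
  have hkB := PySem.Dict.keys_foldl_insert_key
      ((PySem.Set.ofList ps).map (fun k => (k, (ps.count k : Int)))) (fun q => q.1.1)
      (fun (r : PySem.Dict String (PySem.Dict String Int)) q =>
        ((r.getD q.1.1 PySem.Dict.empty).insert q.1.2 q.2)) PySem.Dict.empty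
  rw [PySem.Dict.keys_empty, PySem.Set.update_nil_left] at hkA hkB
  rw [List.map_map] at hkB
  have hkeys : (ps.foldl (fun (h : PySem.Dict String (PySem.Dict String Int)) p =>
        h.insert p.1 ((h.getD p.1 PySem.Dict.empty).insert p.2
          ((h.getD p.1 PySem.Dict.empty).getD p.2 0 + 1))) PySem.Dict.empty).keys
      = (((PySem.Set.ofList ps).map (fun k => (k, (ps.count k : Int)))).foldl
          (fun (r : PySem.Dict String (PySem.Dict String Int)) q =>
            r.insert q.1.1 ((r.getD q.1.1 PySem.Dict.empty).insert q.1.2 q.2))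
          PySem.Dict.empty).keys := by
    rw [hkA, hkB]
    have : ((fun q : (String × String) × Int => q.1.1) ∘ fun k : String × String =>
        (k, (ps.count k : Int))) = fun k : String × String => k.1 := rfl
    rw [this, ofList_map_ofList]
  -- pointwise inner dicts
  have hgetD : ∀ f : String,
      (ps.foldl (fun (h : PySem.Dict String (PySem.Dict String Int)) p =>
        h.insert p.1 ((h.getD p.1 PySem.Dict.empty).insert p.2
          ((h.getD p.1 PySem.Dict.empty).getD p.2 0 + 1))) PySem.Dict.empty).getD f PySem.Dict.empty
      = (((PySem.Set.ofList ps).map (fun k => (k, (ps.count k : Int)))).foldl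
          (fun (r : PySem.Dict String (PySem.Dict String Int)) q =>
            r.insert q.1.1 ((r.getD q.1.1 PySem.Dict.empty).insert q.1.2 q.2))
          PySem.Dict.empty).getD f PySem.Dict.empty := by
    intro f
    rw [getD_foldl_ikey Prod.fst (fun m p => m.insert p.2 (m.getD p.2 0 + 1)) ps f,
        getD_foldl_ikey (fun q => q.1.1) (fun m q => m.insert q.1.2 q.2)
          ((PySem.Set.ofList ps).map (fun k => (k, (ps.count k : Int)))) f]
    simp only [PySem.Dict.getD_empty, List.filter_map]
    have hcomp : ((fun q : (String × String) × Int => q.1.1 == f) ∘ fun k => (k, (ps.count k : Int)))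
        = fun k : String × String => k.1 == f := rfl
    rw [hcomp, List.foldl_map]
    dsimp only
    rw [inner_eq ps f, ← PySem.Dict.foldl_insert_getD_add_one_eq_counter, List.foldl_map]
  -- keys are unique on both sides
  have hndA : (ps.foldl (fun (h : PySem.Dict String (PySem.Dict String Int)) p =>
        h.insert p.1 ((h.getD p.1 PySem.Dict.empty).insert p.2
          ((h.getD p.1 PySem.Dict.empty).getD p.2 0 + 1))) PySem.Dict.empty).keys.Nodup :=
    PySem.Dict.nodup_keys_foldl_insert_key _ _ _ _ (by simp [PySem.Dict.keys_empty])
  have hndB : ((((PySem.Set.ofList ps).map (fun k => (k, (ps.count k : Int)))).foldl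
          (fun (r : PySem.Dict String (PySem.Dict String Int)) q =>
            r.insert q.1.1 ((r.getD q.1.1 PySem.Dict.empty).insert q.1.2 q.2))
          PySem.Dict.empty)).keys.Nodup :=
    PySem.Dict.nodup_keys_foldl_insert_key _ _ _ _ (by simp [PySem.Dict.keys_empty])
  apply PySem.Dict.ext
  refine (PySem.Dict.items_eq_map_keys _ hndA PySem.Dict.empty).trans ?_
  refine Eq.trans ?_ (PySem.Dict.items_eq_map_keys _ hndB PySem.Dict.empty).symm
  rw [hkeys]
  exact List.map_congr_left fun k _ => by rw [hgetD k]

-- ===== VERDICT (by name: the statement is the Claim_ definition above) =====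
theorem history_spec : Claim_equal_history := by
  intro entries _
  unfold Spec_history history history_alt
  rw [dict_eq]
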